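-- pv_equiv track=rewrite | github.com/aeddk-bnh/guide-for-ai | setup_kilo_env.py | build_kilo_permissions
-- ===== SOURCE A (Python) =====
-- KNOWN_KILO_TOOLS = ("read", "write", "edit", "glob", "grep", "bash", "task", "webfetch")
--
-- def normalize_tool_name(tool_name):
--     normalized = str(tool_name).strip().lower()
--     mapping = {
--         "read": "read",
--         "write": "write",
--         "edit": "edit",
--         "glob": "glob",
--         "grep": "grep",
--         "bash": "bash",
--         "task": "task",
--         "webfetch": "webfetch",
--     }
--     return mapping.get(normalized)
--
-- def build_kilo_permissions(allowed_tools, disallowed_tools):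
--     normalized_allowed = [
--         tool for tool in (normalize_tool_name(entry) for entry in allowed_tools) if tool
--     ]
--     normalized_disallowed = [
--         tool for tool in (normalize_tool_name(entry) for entry in disallowed_tools) if tool
--     ]
--
--     permissions = {}
--     if normalized_allowed:
--         permissions = {tool: "deny" for tool in KNOWN_KILO_TOOLS}
--         for tool in normalized_allowed:
--             permissions[tool] = "allow"
--
--     for tool in normalized_disallowed:
--         permissions[tool] = "deny"
--
--     return permissions
-- ===== SOURCE B (Python) =====
-- KNOWN_KILO_TOOLS = ("read", "write", "edit", "glob", "grep", "bash", "task", "webfetch")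
--
-- def _norm(entry):
--     name = str(entry).strip().lower()
--     return name if name in KNOWN_KILO_TOOLS else None
--
-- def build_kilo_permissions(allowed_tools, disallowed_tools):
--     if any(_norm(e) is not None for e in allowed_tools):
--         # decide each tool's final permission by scanning the raw inputs directly
--         return {
--             t: "deny" if any(_norm(e) == t for e in disallowed_tools)
--                else ("allow" if any(_norm(e) == t for e in allowed_tools) else "deny")
--             for t in KNOWN_KILO_TOOLS
--         }
--     out = {}
--     for e in disallowed_tools:
--         t = _norm(e)
--         if t is not None and t not in out:
--             out[t] = "deny"
--     return out
-- ===== Notes on version B (the rewrite author's own statement) =====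
-- stated objective: alternative
-- what changed: B builds no normalized lists and no seeded dict: when some allowed entry is valid it decides each tool's final permission by per-tool any() scans of the raw input lists, and otherwise it collects the first occurrence of each normalized disallowed entry in one guarded pass; A instead normalizes both lists, seeds an all-deny dict and overwrites it with two loops.
import Mathlib
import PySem

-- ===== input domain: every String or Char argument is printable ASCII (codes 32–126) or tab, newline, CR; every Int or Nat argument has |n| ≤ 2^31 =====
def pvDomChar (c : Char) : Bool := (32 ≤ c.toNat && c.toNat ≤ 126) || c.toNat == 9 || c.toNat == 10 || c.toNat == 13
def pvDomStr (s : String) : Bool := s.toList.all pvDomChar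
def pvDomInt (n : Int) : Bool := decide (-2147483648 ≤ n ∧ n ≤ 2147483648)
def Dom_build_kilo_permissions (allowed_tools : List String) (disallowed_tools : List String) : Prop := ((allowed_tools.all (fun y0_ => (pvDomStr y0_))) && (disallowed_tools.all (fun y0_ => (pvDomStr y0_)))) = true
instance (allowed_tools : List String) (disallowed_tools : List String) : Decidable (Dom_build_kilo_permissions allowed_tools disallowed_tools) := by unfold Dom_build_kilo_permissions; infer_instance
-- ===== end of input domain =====

-- B decides each tool's permission by per-tool scans of the raw inputs (and one guarded
-- first-occurrence pass when no allowed entry is valid) instead of A's normalize-then-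
-- seed-and-overwrite dict loops (objective: alternative).


-- ===== PORT A =====
def KNOWN_KILO_TOOLS : List String := ["read", "write", "edit", "glob", "grep", "bash", "task", "webfetch"]

def normalize_tool_name (tool_name : String) : Option String :=
  let normalized := PySem.Str.lower (PySem.Str.strip tool_name)
  let mapping : PySem.Dict String String := PySem.Dict.ofList
    [("read", "read"), ("write", "write"), ("edit", "edit"), ("glob", "glob"),
     ("grep", "grep"), ("bash", "bash"), ("task", "task"), ("webfetch", "webfetch")]
  mapping.get? normalized

-- '[tool for tool in (normalize_tool_name(e) for e in xs) if tool]' — keep non-None, non-empty results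
def pvNormList (xs : List String) : List String :=
  (xs.map normalize_tool_name).filterMap
    (fun o => match o with
      | some t => if t = "" then none else some t
      | none => none)

def build_kilo_permissions (allowed_tools : List String) (disallowed_tools : List String) : List (String × String) :=
  let normalized_allowed := pvNormList allowed_tools
  let normalized_disallowed := pvNormList disallowed_tools
  let permissions : PySem.Dict String String := PySem.Dict.empty
  let permissions :=
    if normalized_allowed ≠ [] then
      let p := KNOWN_KILO_TOOLS.foldl (fun p t => p.insert t "deny") PySem.Dict.empty
      normalized_allowed.foldl (fun p t => p.insert t "allow") p
    else permissions
  let permissions := normalized_disallowed.foldl (fun p t => p.insert t "deny") permissions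
  permissions.items

-- ===== PORT B =====
-- _norm(entry): the normalized name if it is a known tool, else None
def pvBNorm (entry : String) : Option String :=
  let name := PySem.Str.lower (PySem.Str.strip entry)
  if KNOWN_KILO_TOOLS.contains name then some name else none

def build_kilo_permissions_alt (allowed_tools : List String) (disallowed_tools : List String) : List (String × String) :=
  if allowed_tools.any (fun e => (pvBNorm e).isSome) then
    KNOWN_KILO_TOOLS.map (fun t =>
      (t, if disallowed_tools.any (fun e => pvBNorm e == some t) then "deny"
          else if allowed_tools.any (fun e => pvBNorm e == some t) then "allow"
          else "deny"))
  else
    (disallowed_tools.foldl (fun out e =>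
        match pvBNorm e with
        | some t => if (out.get? t).isSome then out else out.insert t "deny"
        | none => out) PySem.Dict.empty).items

-- ===== PRECONDITION & SPEC =====
def Spec_build_kilo_permissions (allowed_tools : List String) (disallowed_tools : List String) (out : List (String × String)) : Prop := out = build_kilo_permissions_alt allowed_tools disallowed_tools
instance (allowed_tools : List String) (disallowed_tools : List String) (out : List (String × String)) : Decidable (Spec_build_kilo_permissions allowed_tools disallowed_tools out) := by unfold Spec_build_kilo_permissions; infer_instance

-- ===== CLAIM (what is proved, stated in full; the proofs are below) =====
def Claim_equal_build_kilo_permissions : Prop := ∀ (allowed_tools : List String) (disallowed_tools : List String), Dom_build_kilo_permissions allowed_tools disallowed_tools → Spec_build_kilo_permissions allowed_tools disallowed_tools (build_kilo_permissions allowed_tools disallowed_tools)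

-- ===== LEMMAS AND PROOFS =====

-- A's table lookup is membership in the fixed tool list
lemma pv_table_get (s : String) :
    (PySem.Dict.ofList
      [("read", "read"), ("write", "write"), ("edit", "edit"), ("glob", "glob"),
       ("grep", "grep"), ("bash", "bash"), ("task", "task"), ("webfetch", "webfetch")]
      : PySem.Dict String String).get? s =
      if KNOWN_KILO_TOOLS.contains s then some s else none := by
  simp only [PySem.Dict.ofList, PySem.Dict.update, List.foldl,
    KNOWN_KILO_TOOLS, List.contains_cons, PySem.Dict.get?_insert, PySem.Dict.get?_empty]
  split_ifs <;> simp_all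

lemma pv_normalize_eq (e : String) : normalize_tool_name e = pvBNorm e := by
  simp only [normalize_tool_name, pvBNorm]
  exact pv_table_get _

lemma pvBNorm_eq (e : String) :
    pvBNorm e = if KNOWN_KILO_TOOLS.contains (PySem.Str.lower (PySem.Str.strip e))
                then some (PySem.Str.lower (PySem.Str.strip e)) else none := rfl

lemma pvBNorm_some_mem {e k : String} (h : pvBNorm e = some k) : k ∈ KNOWN_KILO_TOOLS := by
  by_cases hc : PySem.Str.lower (PySem.Str.strip e) ∈ KNOWN_KILO_TOOLS
  · rw [pvBNorm_eq, if_pos (List.contains_iff_mem.mpr hc)] at h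
    have h' := Option.some.inj h
    rw [← h']
    exact hc
  · rw [pvBNorm_eq, if_neg (fun hcc => hc (List.contains_iff_mem.mp hcc))] at h
    simp at h

-- A's normalization comprehension is filterMap by B's _norm
lemma pvNormList_eq (xs : List String) : pvNormList xs = xs.filterMap pvBNorm := by
  rw [pvNormList, List.filterMap_map]
  apply List.filterMap_congr
  intro e _
  simp only [Function.comp_apply, pv_normalize_eq]
  cases hx : pvBNorm e with
  | none => rfl
  | some s =>
    have hne : ¬ (s = "") := fun he => absurd (he ▸ pvBNorm_some_mem hx) (by decide)
    show (if s = "" then (none : Option String) else some s) = some s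
    rw [if_neg hne]

lemma pvNorm_mem_known {xs : List String} {k : String} (h : k ∈ xs.filterMap pvBNorm) :
    k ∈ KNOWN_KILO_TOOLS := by
  rcases List.mem_filterMap.mp h with ⟨e, _, he⟩
  exact pvBNorm_some_mem he

-- lookup through a constant-value insert loop
lemma get?_foldl_insert_const (l : List String) (v : String) (d : PySem.Dict String String) (k : String) :
    (l.foldl (fun p t => p.insert t v) d).get? k =
      if k ∈ l then some v else d.get? k := by
  induction l generalizing d with
  | nil => simp
  | cons x xs ih =>
    simp only [List.foldl_cons, ih, List.mem_cons]
    by_cases hm : k ∈ xs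
    · simp [hm]
    · by_cases hk : k = x
      · subst hk; simp [hm]
      · simp [hk, PySem.Dict.get?_insert]

-- re-inserting a key with the value it already holds changes nothing
lemma insert_same_value (d : PySem.Dict String String) (k v : String)
    (hn : d.keys.Nodup) (h : d.get? k = some v) : d.insert k v = d := by
  apply PySem.Dict.ext
  rw [PySem.Dict.items_insert_of_contains d v (by
    rw [PySem.Dict.contains_eq_isSome_get?, h]; rfl)]
  conv_rhs => rw [← List.map_id d.items]
  apply List.map_congr_left
  intro p hp
  by_cases hk : p.1 = k
  · have hgp : d.get? p.1 = some p.2 :=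
      PySem.Dict.get?_of_mem_items _ (by simpa using hp) hn
    rw [hk, h] at hgp
    have hv := Option.some.inj hgp
    have hbk : (p.1 == k) = true := by simp [hk]
    simp only [id_eq, if_pos hbk]
    rw [← hk, hv]
  · have hbk : ¬ ((p.1 == k) = true) := by simp [hk]
    simp only [id_eq, if_neg hbk]

-- B's guarded first-occurrence pass equals A's unconditional "deny" overwrite loop
lemma guarded_eq_insert (l : List String) (d : PySem.Dict String String)
    (hn : d.keys.Nodup) (hv : ∀ k w, d.get? k = some w → w = "deny") :
    l.foldl (fun out e =>
        match pvBNorm e with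
        | some t => if (out.get? t).isSome then out else out.insert t "deny"
        | none => out) d
      = (l.filterMap pvBNorm).foldl (fun p t => p.insert t "deny") d := by
  induction l generalizing d with
  | nil => simp only [List.filterMap_nil, List.foldl_nil]
  | cons x xs ih =>
    rw [List.foldl_cons, List.filterMap_cons]
    cases hx : pvBNorm x with
    | none =>
      dsimp only
      exact ih d hn hv
    | some t =>
      dsimp only
      rw [List.foldl_cons]
      by_cases hp : ((d.get? t).isSome : Bool) = true
      · rcases Option.isSome_iff_exists.mp hp with ⟨w, hw⟩
        have hwd := hv t w hw
        subst hwd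
        rw [if_pos hp, insert_same_value d t "deny" hn hw]
        exact ih d hn hv
      · rw [if_neg hp]
        refine ih _ (PySem.Dict.nodup_keys_insert _ _ _ hn) ?_
        intro k w hw
        rw [PySem.Dict.get?_insert] at hw
        split_ifs at hw with hk
        · exact (Option.some.inj hw).symm
        · exact hv k w hw

-- updating a set with elements it already has changes nothing
lemma set_update_of_subset (s : PySem.Set String) (l : List String)
    (h : ∀ x ∈ l, x ∈ s) : PySem.Set.update s l = s := by
  induction l generalizing s with
  | nil => rfl
  | cons x xs ih =>
    rw [PySem.Set.update_cons, PySem.Set.add_of_mem (h x (by simp))]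
    exact ih s (fun y hy => h y (by simp [hy]))

-- ===== VERDICT (by name: the statement is the Claim_ definition above) =====
theorem build_kilo_permissions_spec : Claim_equal_build_kilo_permissions := by
  intro a d _
  unfold Spec_build_kilo_permissions
  simp only [build_kilo_permissions, build_kilo_permissions_alt, pvNormList_eq]
  set na := a.filterMap pvBNorm with hna
  set nd := d.filterMap pvBNorm with hnd
  have hbranch : (a.any (fun e => (pvBNorm e).isSome) = true) ↔ na ≠ [] := by
    rw [List.any_eq_true]
    constructor
    · rintro ⟨e, he, hs⟩ hnil
      rcases Option.isSome_iff_exists.mp hs with ⟨t, ht⟩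
      have hm : t ∈ na := List.mem_filterMap.mpr ⟨e, he, ht⟩
      rw [hnil] at hm
      simp at hm
    · intro hne
      rcases List.exists_mem_of_ne_nil _ hne with ⟨t, ht⟩
      rcases List.mem_filterMap.mp ht with ⟨e, he, hte⟩
      exact ⟨e, he, by rw [hte]; rfl⟩
  have hmemany : ∀ (xs : List String) (k : String),
      (xs.any (fun e => pvBNorm e == some k)) = decide (k ∈ xs.filterMap pvBNorm) := by
    intro xs k
    by_cases hm : k ∈ xs.filterMap pvBNorm
    · rcases List.mem_filterMap.mp hm with ⟨e, he, hke⟩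
      simp only [hm, decide_true, List.any_eq_true]
      exact ⟨e, he, by simp [hke]⟩
    · simp only [hm, decide_false, List.any_eq_false]
      intro e he hc
      exact hm (List.mem_filterMap.mpr ⟨e, he, by simpa using hc⟩)
  by_cases hempty : na = []
  · -- no valid allowed entry: both return the normalized-disallowed keys, all "deny"
    have hAfalse : ¬ ((a.any (fun e => (pvBNorm e).isSome)) = true) :=
      fun h => (hbranch.mp h) hempty
    rw [if_neg (not_not_intro hempty), if_neg hAfalse,
      guarded_eq_insert d PySem.Dict.empty PySem.Dict.nodup_keys_empty
        (by intro k w hw; rw [PySem.Dict.get?_empty] at hw; simp at hw),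
      ← hnd]
  · -- some allowed entry is valid: both cover the full tool universe
    have hAtrue : (a.any (fun e => (pvBNorm e).isSome)) = true := hbranch.mpr hempty
    rw [if_pos hempty, if_pos hAtrue]
    set d2 := nd.foldl (fun p t => p.insert t "deny")
      (na.foldl (fun p t => p.insert t "allow")
        (KNOWN_KILO_TOOLS.foldl (fun p t => p.insert t "deny") PySem.Dict.empty)) with hd2
    have hnamem : ∀ x ∈ na, x ∈ KNOWN_KILO_TOOLS := fun x hx => pvNorm_mem_known (hna ▸ hx)
    have hndmem : ∀ x ∈ nd, x ∈ KNOWN_KILO_TOOLS := fun x hx => pvNorm_mem_known (hnd ▸ hx)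
    have hkeys : d2.keys = KNOWN_KILO_TOOLS := by
      rw [hd2, PySem.Dict.keys_foldl_insert, PySem.Dict.keys_foldl_insert,
        PySem.Dict.keys_foldl_insert, PySem.Dict.keys_empty, PySem.Set.update_nil_left]
      have hof : PySem.Set.ofList KNOWN_KILO_TOOLS = KNOWN_KILO_TOOLS := by decide
      rw [hof, set_update_of_subset _ _ hnamem, set_update_of_subset _ _ hndmem]
    have hnodup : d2.keys.Nodup := by
      rw [hd2]
      exact PySem.Dict.nodup_keys_foldl_insert _ _ _
        (PySem.Dict.nodup_keys_foldl_insert _ _ _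
          (PySem.Dict.nodup_keys_foldl_insert _ _ _ PySem.Dict.nodup_keys_empty))
    rw [PySem.Dict.items_eq_map_keys _ hnodup "deny", hkeys]
    apply List.map_congr_left
    intro k hk
    have hget : d2.getD k "deny"
        = if k ∈ nd then "deny" else if k ∈ na then "allow" else "deny" := by
      rw [hd2, PySem.Dict.getD_eq_get?_getD, get?_foldl_insert_const]
      by_cases h1 : k ∈ nd
      · simp [h1]
      · rw [get?_foldl_insert_const]
        by_cases h2 : k ∈ na
        · simp [h1, h2]
        · rw [get?_foldl_insert_const]
          simp [h1, h2, hk]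
    rw [hget, hmemany d k, hmemany a k, ← hnd, ← hna]
    by_cases h1 : k ∈ nd <;> by_cases h2 : k ∈ na <;> simp [h1, h2]
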